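-- pv_equiv track=rewrite | github.com/kevinwang66/vgcn-bertram | new-seqclass+train+bertram.py | selective_replace
-- ===== SOURCE A (Python) =====
-- def selective_replace(text):
--     result = []
--     in_bertram_tag = False  # 标记是否在 <BERTRAM:##...> 中
--     i = 0
--     while i < len(text):
--         # 进入 <BERTRAM:## 的情况
--         if text[i:i+11] == '<BERTRAM:##' and not in_bertram_tag:
--             in_bertram_tag = True
--             result.append(text[i:i+11])  # 添加 `<BERTRAM:##`
--             i += 11  # 跳过 `<BERTRAM:##`
--
--         # 退出 <BERTRAM:## 的情况
--         elif in_bertram_tag and text[i] == '>':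
--             in_bertram_tag = False
--             result.append(text[i])  # 添加 `>`
--             i += 1
--
--         # 删除其他地方的 ##
--         elif text[i:i+2] == '##' and not in_bertram_tag:
--             i += 2  # 跳过 ##
--
--         else:
--             result.append(text[i])
--             i += 1
--
--     return ''.join(result)
-- ===== SOURCE B (Python) =====
-- def selective_replace(text):
--     # Block-wise: copy tag regions verbatim, strip '##' from the text between them.
--     out = []
--     rest = text
--     while True:
--         j = rest.find('<BERTRAM:##')
--         if j == -1:
--             out.append(rest.replace('##', ''))
--             break
--         out.append(rest[:j].replace('##', ''))
--         rest = rest[j:]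
--         k = rest[11:].find('>')
--         if k == -1:
--             out.append(rest)
--             break
--         out.append(rest[:12 + k])
--         rest = rest[12 + k:]
--     return ''.join(out)
-- ===== Notes on version B (the rewrite author's own statement) =====
-- stated objective: faster
-- what changed: Replaced A's per-character state machine (a flag plus one-char slices per iteration) by block-wise processing: repeatedly locate the next tag opener with str.find, strip the hash pairs from the preceding segment with one str.replace, copy the tag region through its closing bracket verbatim, and continue after it.
import Mathlib
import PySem

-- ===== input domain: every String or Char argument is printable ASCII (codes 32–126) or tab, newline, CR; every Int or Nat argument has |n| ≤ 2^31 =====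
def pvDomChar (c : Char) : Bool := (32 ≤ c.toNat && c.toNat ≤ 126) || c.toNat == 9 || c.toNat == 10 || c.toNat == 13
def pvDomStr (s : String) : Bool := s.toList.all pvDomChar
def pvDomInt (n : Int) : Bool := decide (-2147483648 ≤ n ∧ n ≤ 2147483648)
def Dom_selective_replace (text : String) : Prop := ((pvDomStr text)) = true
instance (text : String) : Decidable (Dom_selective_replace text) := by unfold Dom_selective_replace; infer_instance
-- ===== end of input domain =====

-- B replaces A's per-character state machine by block-wise processing (find the next tag,
-- strip the hash pairs from the segment before it with replace, copy the tag region verbatim);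
-- objective: faster by a constant factor (bulk find/replace instead of per-character slicing), measured.

-- the literal '<BERTRAM:##'
def pvTag : List Char := ['<', 'B', 'E', 'R', 'T', 'R', 'A', 'M', ':', '#', '#']

-- ===== PORT A =====
-- literal port of A's while-loop: index i becomes the remaining suffix, in_bertram_tag is the flag
def pvRunA (cs : List Char) (inTag : Bool) : List Char :=
  match cs with
  | [] => []
  | c :: t =>
    if (c :: t).take 11 = pvTag ∧ inTag = false then
      (c :: t).take 11 ++ pvRunA ((c :: t).drop 11) true
    else if inTag = true ∧ c = '>' then
      c :: pvRunA t false
    else if (c :: t).take 2 = ['#', '#'] ∧ inTag = false then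
      pvRunA ((c :: t).drop 2) false
    else
      c :: pvRunA t inTag
termination_by cs.length
decreasing_by all_goals simp; try omega

def selective_replace (text : String) : String := String.ofList (pvRunA text.toList false)

-- ===== PORT B =====
-- literal port of Source B's loop: 'rest' is the remaining suffix, each round emits one
-- replaced outside segment and (if found) one verbatim tag region
def pvRunB (cs : List Char) : List Char :=
  let j := PySem.Chars.find cs pvTag
  if hj : j = -1 then PySem.Chars.replace cs ['#', '#'] []
  else
    let pre := PySem.Chars.replace (cs.take j.toNat) ['#', '#'] []
    let rest := cs.drop j.toNat
    let k := PySem.Chars.find (rest.drop 11) ['>']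
    if k = -1 then pre ++ rest
    else pre ++ rest.take (12 + k.toNat) ++ pvRunB (rest.drop (12 + k.toNat))
termination_by cs.length
decreasing_by
  have hinf : pvTag <:+: cs := by
    have := PySem.Chars.find_ne_neg_one_iff (s := cs) (sub := pvTag)
    exact this.mp hj
  have hlen : 11 ≤ cs.length := by
    have := hinf.length_le
    simpa [pvTag] using this
  simp
  omega

def selective_replace_alt (text : String) : String := String.ofList (pvRunB text.toList)

-- ===== PRECONDITION & SPEC =====
def Spec_selective_replace (text : String) (out : String) : Prop := out = selective_replace_alt text
instance (text : String) (out : String) : Decidable (Spec_selective_replace text out) := by unfold Spec_selective_replace; infer_instance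

-- ===== CLAIM (what is proved, stated in full; the proofs are below) =====
def Claim_equal_selective_replace : Prop := ∀ (text : String), Dom_selective_replace text → Spec_selective_replace text (selective_replace text)

-- ===== LEMMAS AND PROOFS =====

-- structural form of cs.replace('##', '')
def pvRepl : List Char → List Char
  | [] => []
  | c :: t => if ['#', '#'].isPrefixOf (c :: t) then pvRepl (t.drop 1) else c :: pvRepl t
termination_by cs => cs.length
decreasing_by all_goals simp; try omega

theorem pvReplaceGo_eq (fuel : Nat) (l acc : List Char) (h : l.length ≤ fuel) :
    PySem.Chars.replace.go ['#', '#'] [] fuel l acc = acc.reverse ++ pvRepl l := by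
  induction fuel generalizing l acc with
  | zero =>
    have : l = [] := List.length_eq_zero_iff.mp (Nat.le_zero.mp h)
    subst this
    simp [PySem.Chars.replace.go, pvRepl]
  | succ n ih =>
    cases l with
    | nil => simp [PySem.Chars.replace.go, pvRepl]
    | cons c t =>
      rw [PySem.Chars.replace.go]
      by_cases hp : ['#', '#'].isPrefixOf (c :: t)
      · rw [if_pos hp]
        have hd : List.drop (['#', '#'] : List Char).length (c :: t) = t.drop 1 := by simp
        rw [hd, ih (t.drop 1) ([].reverse ++ acc) (by simp at h ⊢; omega)]
        rw [pvRepl]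
        simp [hp]
      · rw [if_neg (by simpa using hp), ih t (c :: acc) (by simp at h ⊢; omega)]
        rw [pvRepl]
        simp [hp]

theorem pvReplace_eq (l : List Char) :
    PySem.Chars.replace l ['#', '#'] [] = pvRepl l := by
  rw [PySem.Chars.replace]
  simpa using pvReplaceGo_eq l.length l [] le_rfl

theorem pvTag_take_iff (cs : List Char) : cs.take 11 = pvTag ↔ pvTag <+: cs := by
  constructor
  · intro h; exact h ▸ List.take_prefix 11 cs
  · intro h
    have := List.prefix_iff_eq_take.mp h
    simpa [pvTag] using this.symm

theorem pvSharp_shape (c : Char) (t : List Char) (hp : (['#', '#'] : List Char).isPrefixOf (c :: t)) :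
    c = '#' ∧ ∃ r, t = '#' :: r := by
  obtain ⟨r, hr⟩ := List.isPrefixOf_iff_prefix.mp hp
  simp at hr
  exact ⟨hr.1.symm, r, hr.2.symm⟩

theorem pvTake2_iff (c : Char) (t : List Char) :
    (c :: t).take 2 = ['#', '#'] ↔ (['#', '#'] : List Char).isPrefixOf (c :: t) := by
  rw [List.isPrefixOf_iff_prefix]
  constructor
  · intro h; exact h ▸ List.take_prefix 2 (c :: t)
  · intro h
    have := List.prefix_iff_eq_take.mp h
    simpa using this.symm

theorem pvSharp_isPrefixOf (l : List Char) :
    (['#', '#'] : List Char).isPrefixOf ('#' :: '#' :: l) = true := by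
  simp [List.isPrefixOf]

-- A outside any tag, when no tag ever occurs: it is replace('##','')
theorem pvRunA_noTag (cs : List Char) (h : ∀ i, ¬ pvTag <+: cs.drop i) :
    pvRunA cs false = pvRepl cs := by
  induction hn : cs.length using Nat.strong_induction_on generalizing cs with
  | _ n ih =>
  cases cs with
  | nil => simp [pvRunA, pvRepl]
  | cons c t =>
    have htag : ¬ (c :: t).take 11 = pvTag := by
      intro hx; exact h 0 (by simpa using (pvTag_take_iff _).mp hx)
    rw [pvRunA, if_neg (fun hx => htag hx.1), if_neg (by simp)]
    by_cases hp : (['#', '#'] : List Char).isPrefixOf (c :: t)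
    · obtain ⟨hc1, r, hc2⟩ := pvSharp_shape c t hp
      subst hc1; subst hc2
      rw [if_pos ⟨(pvTake2_iff _ _).mpr hp, rfl⟩]
      rw [pvRepl, if_pos hp]
      have := ih r.length (by subst hn; simp) r
        (fun i => by simpa [List.drop_drop, Nat.add_comm] using h (i + 2)) rfl
      simpa using this
    · rw [if_neg (fun hx => hp ((pvTake2_iff c t).mp hx.1))]
      rw [pvRepl, if_neg (by simpa using hp)]
      have := ih t.length (by subst hn; simp) t
        (fun i => by simpa [List.drop_drop, Nat.add_comm] using h (i + 1)) rfl
      rw [this]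

-- A outside any tag, up to the first tag occurrence: replace the segment, then continue at the tag
theorem pvRunA_before (n : Nat) (cs : List Char)
    (hmin : ∀ i < n, ¬ pvTag <+: cs.drop i) (hat : pvTag <+: cs.drop n) :
    pvRunA cs false = pvRepl (cs.take n) ++ pvRunA (cs.drop n) false := by
  induction n using Nat.strong_induction_on generalizing cs with
  | _ n ih =>
  cases n with
  | zero => simp [pvRepl]
  | succ m =>
    cases cs with
    | nil =>
      exfalso
      have : pvTag <+: ([] : List Char) := by simpa using hat
      simp [pvTag] at this
    | cons c t =>
      have htag : ¬ (c :: t).take 11 = pvTag := by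
        intro hx; exact hmin 0 (Nat.succ_pos m) (by simpa using (pvTag_take_iff _).mp hx)
      rw [pvRunA, if_neg (fun hx => htag hx.1), if_neg (by simp)]
      by_cases hp : (['#', '#'] : List Char).isPrefixOf (c :: t)
      · obtain ⟨hc1, r, hc2⟩ := pvSharp_shape c t hp
        subst hc1; subst hc2
        -- m ≠ 0: the char right after this '#' is '#', but a tag there starts with '<'
        have hm : m ≠ 0 := by
          intro h0; subst h0
          have h1 : pvTag <+: '#' :: r := by simpa using hat
          obtain ⟨r2, hr2⟩ := h1
          simp [pvTag] at hr2
        obtain ⟨m', rfl⟩ : ∃ m', m = m' + 1 := ⟨m - 1, by omega⟩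
        rw [if_pos ⟨(pvTake2_iff _ _).mpr hp, rfl⟩]
        have hdrop : ('#' :: '#' :: r).drop 2 = r := by simp
        rw [hdrop]
        have hmin' : ∀ i < m', ¬ pvTag <+: r.drop i := by
          intro i hi
          have := hmin (i + 2) (by omega)
          simpa [List.drop_drop, Nat.add_comm] using this
        have hat' : pvTag <+: r.drop m' := by simpa using hat
        rw [ih m' (by omega) r hmin' hat']
        have htake : ('#' :: '#' :: r).take (m' + 1 + 1) = '#' :: '#' :: r.take m' := by simp
        rw [htake, pvRepl, if_pos (pvSharp_isPrefixOf (r.take m'))]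
        simp
      · rw [if_neg (fun hx => hp ((pvTake2_iff c t).mp hx.1))]
        have hmin' : ∀ i < m, ¬ pvTag <+: t.drop i := by
          intro i hi
          have := hmin (i + 1) (by omega)
          simpa using this
        have hat' : pvTag <+: t.drop m := by simpa using hat
        rw [ih m (by omega) t hmin' hat']
        have hnp : ¬ (['#', '#'] : List Char).isPrefixOf (c :: t.take m) = true := by
          intro hx
          obtain ⟨hc1, r, hr⟩ := pvSharp_shape _ _ hx
          subst hc1
          cases t with
          | nil => simp at hr
          | cons d t2 =>
            cases m with
            | zero => simp at hr
            | succ m2 =>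
              have hd : d = '#' := by simpa using congrArg List.head? hr
              subst hd
              exact hp (pvSharp_isPrefixOf t2)
        rw [List.take_succ_cons, pvRepl, if_neg hnp]
        simp

-- A at a tag start: copies the 11 tag chars and switches state
theorem pvRunA_atTag (cs : List Char) (h : pvTag <+: cs) :
    pvRunA cs false = pvTag ++ pvRunA (cs.drop 11) true := by
  have htake : cs.take 11 = pvTag := (pvTag_take_iff cs).mpr h
  cases cs with
  | nil => simp [pvTag] at htake
  | cons c t =>
    rw [pvRunA, if_pos (by simp [htake]), htake]

-- A inside a tag, when no '>' follows: copies the rest verbatim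
theorem pvRunA_inTag_noGt (cs : List Char) (h : '>' ∉ cs) :
    pvRunA cs true = cs := by
  induction cs with
  | nil => simp [pvRunA]
  | cons c t ih =>
    have hc : ¬ c = '>' := fun hx => h (hx ▸ List.mem_cons_self)
    rw [pvRunA, if_neg (by simp), if_neg (by simp [hc]), if_neg (by simp)]
    rw [ih (fun hx => h (List.mem_cons_of_mem c hx))]

-- A inside a tag, up to the first '>': copies through it verbatim and switches back
theorem pvRunA_inTag_gt (k : Nat) (cs : List Char)
    (hmin : ∀ i < k, ¬ ['>'] <+: cs.drop i) (hat : ['>'] <+: cs.drop k) :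
    pvRunA cs true = cs.take (k + 1) ++ pvRunA (cs.drop (k + 1)) false := by
  induction k generalizing cs with
  | zero =>
    cases cs with
    | nil => simp at hat
    | cons c t =>
      have hc : c = '>' := by
        obtain ⟨r, hr⟩ := hat
        simp at hr
        exact hr.1.symm
      subst hc
      rw [pvRunA, if_neg (by simp), if_pos (by simp)]
      simp
  | succ m ih =>
    cases cs with
    | nil => simp at hat
    | cons c t =>
      have hc : ¬ c = '>' := by
        intro hx; subst hx
        exact hmin 0 (Nat.succ_pos m) (by simp)
      rw [pvRunA, if_neg (by simp), if_neg (by simp [hc]), if_neg (by simp)]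
      have hmin' : ∀ i < m, ¬ ['>'] <+: t.drop i := by
        intro i hi
        have := hmin (i + 1) (by omega)
        simpa using this
      have hat' : ['>'] <+: t.drop m := by simpa using hat
      rw [ih t hmin' hat']
      simp

theorem pvMain (cs : List Char) : pvRunA cs false = pvRunB cs := by
  induction hn : cs.length using Nat.strong_induction_on generalizing cs with
  | _ n ih =>
  rw [pvRunB]
  by_cases hj : PySem.Chars.find cs pvTag = -1
  · simp only [hj, dite_eq_ite, if_pos]
    rw [pvReplace_eq]
    apply pvRunA_noTag
    intro i hcon
    have hnot : ¬ pvTag <:+: cs := (PySem.Chars.find_eq_neg_one_iff cs pvTag).mp hj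
    have hin : PySem.Chars.isIn pvTag cs = true :=
      (PySem.Chars.exists_prefix_drop_iff_isIn pvTag cs).mp ⟨i, hcon⟩
    exact hnot ((PySem.Chars.isIn_iff_infix pvTag cs).mp hin)
  · rw [dif_neg hj]
    have hj0 : 0 ≤ PySem.Chars.find cs pvTag := by
      have := PySem.Chars.neg_one_le_find cs pvTag
      omega
    obtain ⟨hat, hmin⟩ := PySem.Chars.find_spec (s := cs) (sub := pvTag) hj0
    set jn := (PySem.Chars.find cs pvTag).toNat with hjn
    have hA1 : pvRunA cs false = pvRepl (cs.take jn) ++ pvRunA (cs.drop jn) false :=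
      pvRunA_before jn cs hmin hat
    have hA2 : pvRunA (cs.drop jn) false = pvTag ++ pvRunA ((cs.drop jn).drop 11) true :=
      pvRunA_atTag _ hat
    have hrest : cs.drop jn = pvTag ++ (cs.drop jn).drop 11 := by
      conv_lhs => rw [← List.take_append_drop 11 (cs.drop jn)]
      rw [(pvTag_take_iff (cs.drop jn)).mpr hat]
    rw [pvReplace_eq]
    by_cases hk : PySem.Chars.find ((cs.drop jn).drop 11) ['>'] = -1
    · rw [if_pos hk, hA1, hA2]
      have hno : '>' ∉ (cs.drop jn).drop 11 := by
        intro hmem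
        have hinf : ['>'] <:+: (cs.drop jn).drop 11 := by
          obtain ⟨s1, s2, hs⟩ := List.append_of_mem hmem
          exact ⟨s1, s2, by simpa using hs.symm⟩
        exact (PySem.Chars.find_eq_neg_one_iff _ _).mp hk hinf
      rw [pvRunA_inTag_noGt _ hno]
      conv_rhs => rw [hrest]
    · rw [if_neg hk]
      have hk0 : 0 ≤ PySem.Chars.find ((cs.drop jn).drop 11) ['>'] := by
        have := PySem.Chars.neg_one_le_find ((cs.drop jn).drop 11) ['>']
        omega
      obtain ⟨hkat, hkmin⟩ := PySem.Chars.find_spec (s := (cs.drop jn).drop 11) (sub := ['>']) hk0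
      set kn := (PySem.Chars.find ((cs.drop jn).drop 11) ['>']).toNat with hkn
      rw [hA1, hA2, pvRunA_inTag_gt kn _ hkmin hkat]
      have htake12 : (cs.drop jn).take (12 + kn)
          = pvTag ++ ((cs.drop jn).drop 11).take (kn + 1) := by
        have h12 : 12 + kn = 11 + (kn + 1) := by omega
        rw [h12, List.take_add]
        congr 1
        exact (pvTag_take_iff (cs.drop jn)).mpr hat
      have hdrop12 : (cs.drop jn).drop (12 + kn)
          = ((cs.drop jn).drop 11).drop (kn + 1) := by
        simp only [List.drop_drop]
        congr 1
        omega
      rw [htake12, hdrop12]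
      have hlt : (((cs.drop jn).drop 11).drop (kn + 1)).length < n := by
        subst hn
        have h11 : 11 ≤ (cs.drop jn).length := by
          have := hat.length_le
          simpa [pvTag] using this
        have hdl : (cs.drop jn).length = cs.length - jn := by simp
        simp
        omega
      rw [ih _ hlt _ rfl]
      simp

-- ===== VERDICT (by name: the statement is the Claim_ definition above) =====
theorem selective_replace_spec : Claim_equal_selective_replace := by
  intro text _
  unfold Spec_selective_replace selective_replace selective_replace_alt
  rw [pvMain]
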